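-- pv_equiv track=rewrite | github.com/Mg4145/g3-A-Magical-Code | agents/agent3.py | _unhash_msg
-- ===== SOURCE A (Python) =====
-- def _unhash_msg(encoded_msg, step_size):
--     """Attempts to unhash the encoded message."""
--     step_size = step_size if step_size != 3 else 5
--     encoded_msg_hash_table = {}
--
--     message = []
--     for i, card in enumerate(encoded_msg):
--         address_of_card = card
--         while address_of_card - step_size in encoded_msg_hash_table:
--             address_of_card -= step_size
--
--         encoded_msg_hash_table[card] = address_of_card
--         message.append(address_of_card)
--     return message
-- ===== SOURCE B (Python) =====
-- def _bisect_left(qs, x):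
--     """Leftmost insertion point of x in the sorted list qs (hand-rolled bisect)."""
--     lo, hi = 0, len(qs)
--     while lo < hi:
--         mid = (lo + hi) // 2
--         if qs[mid] < x:
--             lo = mid + 1
--         else:
--             hi = mid
--     return lo
--
--
-- def _run_start(qs, p):
--     """Leftmost k with qs[k] - k == qs[p] - p: start of the consecutive run of
--     integers ending at qs[p] (qs strictly increasing, so i -> qs[i] - i is
--     nondecreasing and binary-searchable)."""
--     c = qs[p] - p
--     lo, hi = 0, p
--     while lo < hi:
--         mid = (lo + hi) // 2
--         if qs[mid] - mid < c:
--             lo = mid + 1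
--         else:
--             hi = mid
--     return lo
--
--
-- def _unhash_msg(encoded_msg, step_size):
--     """Attempts to unhash the encoded message."""
--     step = 5 if step_size == 3 else step_size
--     if step == 0:
--         # a step of 0 cannot link a card to any lower address
--         return list(encoded_msg)
--     # residue (mod step) -> sorted list of the distinct quotients seen so far;
--     # the chain below a card is exactly the consecutive run of quotients ending
--     # at its own quotient minus one, found with two binary searches.
--     classes = {}
--     message = []
--     for card in encoded_msg:
--         q = card // step
--         qs = classes.setdefault(card % step, [])
--         p = _bisect_left(qs, q - 1)
--         if p < len(qs) and qs[p] == q - 1: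
--             k = _run_start(qs, p)
--             message.append(card - (p - k + 1) * step)
--         else:
--             message.append(card)
--         i = _bisect_left(qs, q)
--         if i == len(qs) or qs[i] != q:
--             qs.insert(i, q)
--     return message
-- ===== Notes on version B (the rewrite author's own statement) =====
-- stated objective: alternative
-- what changed: A resolves each card by walking down the chain one dict-membership probe per step; B instead keeps, per residue class modulo the step, a sorted list of the distinct quotients seen so far and finds the chain bottom with two hand-written binary searches (the run of consecutive quotients below the card's quotient), so no per-step walk happens at all.
-- outside the precondition, e.g. on _unhash_msg([7, 7], 0): A does not finish within the time limit, B returns [7, 7]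
import Mathlib
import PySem

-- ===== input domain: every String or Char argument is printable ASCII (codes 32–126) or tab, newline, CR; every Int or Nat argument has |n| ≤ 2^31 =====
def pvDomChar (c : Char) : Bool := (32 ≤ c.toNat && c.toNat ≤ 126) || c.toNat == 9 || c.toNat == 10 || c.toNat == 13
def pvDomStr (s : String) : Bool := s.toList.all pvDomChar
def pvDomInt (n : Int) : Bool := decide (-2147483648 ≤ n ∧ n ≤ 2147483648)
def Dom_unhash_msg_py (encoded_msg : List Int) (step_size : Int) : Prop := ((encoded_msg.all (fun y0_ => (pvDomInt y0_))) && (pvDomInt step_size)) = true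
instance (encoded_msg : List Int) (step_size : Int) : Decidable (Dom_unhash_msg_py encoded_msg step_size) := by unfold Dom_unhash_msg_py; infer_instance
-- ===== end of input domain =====

-- B replaces A's per-card step-by-step chain walk by per-residue sorted lists of the
-- distinct quotients seen, queried with two hand-written binary searches (objective:
-- alternative). (Equivalence is about the return value; neither mutates its arguments.)


-- ===== PORT A =====
-- the loop 'while address_of_card - step_size in encoded_msg_hash_table: address_of_card -= step_size';
-- the fuel (dict size + 1) only makes it total: on Pre_ inputs the visited keys are distinct
-- members of the dict, so the fuel never runs out
def pvAWhile (t : PySem.Dict Int Int) (step : Int) : Nat → Int → Int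
  | 0, a => a
  | fuel + 1, a => if t.contains (a - step) then pvAWhile t step fuel (a - step) else a

-- the body of A's 'for i, card in enumerate(encoded_msg)' loop (the index i is unused)
def pvFA (step : Int) (st : List Int × PySem.Dict Int Int) (card : Int) : List Int × PySem.Dict Int Int :=
  let addr := pvAWhile st.2 step (st.2.size + 1) card
  (st.1 ++ [addr], st.2.insert card addr)

def unhash_msg_py (encoded_msg : List Int) (step_size : Int) : List Int :=
  let step := if step_size ≠ 3 then step_size else 5
  (encoded_msg.foldl (pvFA step) ([], PySem.Dict.empty)).1

-- ===== PORT B =====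
-- Source B's hand-written '_bisect_left(qs, x)': 'while lo < hi: mid = (lo+hi)//2; …';
-- qs[mid] is always in range (0 ≤ lo ≤ mid < hi ≤ len qs), ported with List.getD (exact there);
-- (lo+hi)//2 on the nonnegative ints lo, hi is Nat division (exact)
-- structural recursion on a fuel ≥ hi - lo (the loop shrinks hi - lo each turn,
-- so with enough fuel the fuel-0 case is only reached when lo = hi, where the loop stops)
def pvBisect (qs : List Int) (x : Int) : Nat → Nat → Nat → Nat
  | 0, lo, _hi => lo
  | fuel + 1, lo, hi =>
    if lo < hi then
      if qs.getD ((lo + hi) / 2) 0 < x then pvBisect qs x fuel ((lo + hi) / 2 + 1) hi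
      else pvBisect qs x fuel lo ((lo + hi) / 2)
    else lo

-- the loop of Source B's '_run_start(qs, p)' (same shape, key qs[mid] - mid vs c)
def pvRunGo (qs : List Int) (c : Int) : Nat → Nat → Nat → Nat
  | 0, lo, _hi => lo
  | fuel + 1, lo, hi =>
    if lo < hi then
      if qs.getD ((lo + hi) / 2) 0 - ((lo + hi) / 2 : Int) < c then pvRunGo qs c fuel ((lo + hi) / 2 + 1) hi
      else pvRunGo qs c fuel lo ((lo + hi) / 2)
    else lo

-- Source B's '_run_start(qs, p)': computes c = qs[p] - p, then the loop above on [0, p)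
def pvRunStart (qs : List Int) (p : Nat) : Nat :=
  pvRunGo qs (qs.getD p 0 - (p : Int)) p 0 p

-- the body of Source B's 'for card in encoded_msg' loop
def pvFB (step : Int) (st : List Int × PySem.Dict Int (List Int)) (card : Int) :
    List Int × PySem.Dict Int (List Int) :=
  let q := PySem.Int.floordiv card step
  let r := PySem.Int.mod card step
  -- qs = classes.setdefault(card % step, [])
  let d1 := if st.2.contains r then st.2 else st.2.insert r []
  let qs := d1.getD r []
  let p := pvBisect qs (q - 1) qs.length 0 qs.length
  let msg :=
    if p < qs.length ∧ qs.getD p 0 = q - 1 then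
      st.1 ++ [card - (((p : Int) - (pvRunStart qs p : Int) + 1)) * step]
    else
      st.1 ++ [card]
  let i := pvBisect qs q qs.length 0 qs.length
  -- 'qs.insert(i, q)' mutates the list held by the dict under key r
  let d2 := if i = qs.length ∨ qs.getD i 0 ≠ q then d1.insert r (PySem.List.insert qs (i : Int) q) else d1
  (msg, d2)

def unhash_msg_py_alt (encoded_msg : List Int) (step_size : Int) : List Int :=
  let step := if step_size = 3 then 5 else step_size
  if step = 0 then encoded_msg
  else (encoded_msg.foldl (pvFB step) ([], PySem.Dict.empty)).1

-- ===== PRECONDITION & SPEC =====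
-- Pre_ excludes only the inputs where A never returns: with effective step 0 (step_size = 0,
-- since step_size = 3 is remapped to 5) and a repeated card, A's while loop runs forever.
def Pre_unhash_msg_py (encoded_msg : List Int) (step_size : Int) : Prop :=
  step_size = 0 → encoded_msg.Nodup
instance (encoded_msg : List Int) (step_size : Int) : Decidable (Pre_unhash_msg_py encoded_msg step_size) := by unfold Pre_unhash_msg_py; infer_instance

def pvWitness_unhash_msg_py : List Int × Int := ([9, 4, 8, 6, 5, 9], 1)

def Spec_unhash_msg_py (encoded_msg : List Int) (step_size : Int) (out : List Int) : Prop := out = unhash_msg_py_alt encoded_msg step_size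
instance (encoded_msg : List Int) (step_size : Int) (out : List Int) : Decidable (Spec_unhash_msg_py encoded_msg step_size out) := by unfold Spec_unhash_msg_py; infer_instance

-- ===== CLAIM (what is proved, stated in full; the proofs are below) =====
def Claim_equal_unhash_msg_py : Prop := ∀ (encoded_msg : List Int) (step_size : Int), Dom_unhash_msg_py encoded_msg step_size → Pre_unhash_msg_py encoded_msg step_size → Spec_unhash_msg_py encoded_msg step_size (unhash_msg_py encoded_msg step_size)

-- ===== LEMMAS AND PROOFS =====

-- ---------- the chain index J: least j with card - (j+1)*step not among the seen keys ----------
def pvInChain (K : List Int) (step a : Int) (j : Nat) : Prop :=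
  ∀ i : Nat, 1 ≤ i → i ≤ j → (a - (i : Int) * step) ∈ K

theorem pv_exists_exit (K : List Int) (step a : Int) (hs : step ≠ 0) :
    ∃ i : Nat, i ≤ K.length ∧ (a - ((i : Int) + 1) * step) ∉ K := by
  by_contra h
  push Not at h
  have hinj : Function.Injective (fun i : Fin (K.length + 1) => a - ((i : Int) + 1) * step) := by
    intro i i' hii
    simp only at hii
    have h1 : ((i : Int) + 1) * step = ((i' : Int) + 1) * step := by omega
    have h2 := mul_right_cancel₀ hs h1
    have h3 : (i : Int) = (i' : Int) := by omega
    exact Fin.ext (by exact_mod_cast h3)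
  have hsub : Finset.univ.image (fun i : Fin (K.length + 1) => a - ((i : Int) + 1) * step) ⊆ K.toFinset := by
    intro x hx
    simp only [Finset.mem_image] at hx
    obtain ⟨i, -, rfl⟩ := hx
    exact List.mem_toFinset.2 (h i (by omega))
  have h1 := Finset.card_le_card hsub
  rw [Finset.card_image_of_injective _ hinj, Finset.card_univ, Fintype.card_fin] at h1
  have h2 := K.toFinset_card_le
  omega

def pvBotIdx (K : List Int) (step a : Int) (hs : step ≠ 0) : Nat :=
  Nat.find ((pv_exists_exit K step a hs).imp (fun _ h => h.2))

theorem pvBotIdx_le (K : List Int) (step a : Int) (hs : step ≠ 0) :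
    pvBotIdx K step a hs ≤ K.length := by
  obtain ⟨i, hi, hni⟩ := pv_exists_exit K step a hs
  exact le_trans (Nat.find_min' _ hni) hi

theorem pvBotIdx_spec (K : List Int) (step a : Int) (hs : step ≠ 0) :
    (a - ((pvBotIdx K step a hs : Int) + 1) * step) ∉ K :=
  Nat.find_spec ((pv_exists_exit K step a hs).imp (fun _ h => h.2))

theorem pvBotIdx_chain (K : List Int) (step a : Int) (hs : step ≠ 0) :
    pvInChain K step a (pvBotIdx K step a hs) := by
  intro i h1 hi
  unfold pvBotIdx at hi
  have hmin := Nat.find_min ((pv_exists_exit K step a hs).imp (fun _ h => h.2)) (m := i - 1) (by omega)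
  simp only [not_not] at hmin
  rwa [show ((↑(i-1) : Int) + 1) = (i : Int) by push_cast [Nat.cast_sub h1]; ring] at hmin

theorem pvChain_le (K : List Int) (step a : Int) (hs : step ≠ 0) (m : Nat)
    (hc : pvInChain K step a m) : m ≤ pvBotIdx K step a hs := by
  by_contra h
  have hmem := hc (pvBotIdx K step a hs + 1) (by omega) (by omega)
  rw [show ((↑(pvBotIdx K step a hs + 1) : Int)) = ((pvBotIdx K step a hs : Int) + 1) by push_cast; ring] at hmem
  exact pvBotIdx_spec K step a hs hmem

theorem pvBotIdx_unique (K : List Int) (step a : Int) (hs : step ≠ 0) (j : Nat)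
    (hc : pvInChain K step a j) (hb : (a - ((j : Int) + 1) * step) ∉ K) :
    j = pvBotIdx K step a hs := by
  rcases lt_or_eq_of_le (pvChain_le K step a hs j hc) with h | h
  · exfalso
    have hmem := pvBotIdx_chain K step a hs (j+1) (by omega) (by omega)
    rw [show ((↑(j+1):Int)) = (j:Int)+1 by push_cast; ring] at hmem
    exact hb hmem
  · exact h

theorem pvBotIdx_zero (K : List Int) (step a : Int) (hs : step ≠ 0)
    (h : (a - step) ∉ K) : pvBotIdx K step a hs = 0 := by
  refine (pvBotIdx_unique K step a hs 0 (fun i h1 h0 => absurd h0 (by omega)) ?_).symm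
  simpa using h

theorem pvBotIdx_shift (K : List Int) (step a : Int) (hs : step ≠ 0)
    (h : (a - step) ∈ K) :
    pvBotIdx K step a hs = pvBotIdx K step (a - step) hs + 1 := by
  refine (pvBotIdx_unique K step a hs (pvBotIdx K step (a - step) hs + 1) ?_ ?_).symm
  · intro i h1 hi
    rcases Nat.lt_or_ge i 2 with h2 | h2
    · have h3 : i = 1 := by omega
      subst h3
      simpa using h
    · obtain ⟨k, rfl⟩ : ∃ k, i = k + 2 := ⟨i - 2, by omega⟩
      have hm := pvBotIdx_chain K step (a - step) hs (k + 1) (by omega) (by omega)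
      rwa [show (a - step) - (↑(k+1) : Int) * step = a - (↑(k+2) : Int) * step by push_cast; ring] at hm
  · have hm := pvBotIdx_spec K step (a - step) hs
    rwa [show (a - step) - ((pvBotIdx K step (a-step) hs : Int) + 1) * step
        = a - ((↑(pvBotIdx K step (a-step) hs + 1) : Int) + 1) * step by push_cast; ring] at hm

theorem pvNotMem_contains (d : PySem.Dict Int Int) (k : Int) (h : k ∉ d.keys) :
    d.contains k = false := by
  cases hc : d.contains k
  · rfl
  · exact absurd ((PySem.Dict.contains_iff_mem_keys d k).1 hc) h

-- ---------- A's while loop computes card - J*step ----------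
theorem pvAWhile_eq (t : PySem.Dict Int Int) (step : Int) (hs : step ≠ 0) :
    ∀ (fuel : Nat) (a : Int), pvBotIdx t.keys step a hs ≤ fuel →
      pvAWhile t step fuel a = a - (pvBotIdx t.keys step a hs : Int) * step := by
  intro fuel
  induction fuel with
  | zero =>
    intro a hf
    have h0 : pvBotIdx t.keys step a hs = 0 := by omega
    simp [pvAWhile, h0]
  | succ fuel ih =>
    intro a hf
    by_cases hc : t.contains (a - step)
    · have hmem : (a - step) ∈ t.keys := (PySem.Dict.contains_iff_mem_keys t _).1 hc
      have hsh := pvBotIdx_shift t.keys step a hs hmem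
      have hih := ih (a - step) (by omega)
      simp only [pvAWhile, hc, if_true]
      rw [hih, hsh]
      push_cast; ring
    · have h0 := pvBotIdx_zero t.keys step a hs
        (fun hm => hc ((PySem.Dict.contains_iff_mem_keys t _).2 hm))
      simp [pvAWhile, hc, h0]

theorem pvKeysLen (d : PySem.Dict Int Int) : d.keys.length = d.size := by
  simp [PySem.Dict.keys, PySem.Dict.size]

-- ---------- sorted-list facts ----------
theorem pvGetD_lt (qs : List Int) (hs : qs.Pairwise (· < ·)) {i j : Nat}
    (hij : i < j) (hj : j < qs.length) : qs.getD i 0 < qs.getD j 0 := by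
  have hi : i < qs.length := lt_trans hij hj
  have := List.pairwise_iff_getElem.1 hs i j hi hj hij
  rwa [List.getD_eq_getElem qs 0 hi, List.getD_eq_getElem qs 0 hj]

theorem pvGetD_le (qs : List Int) (hs : qs.Pairwise (· < ·)) {i j : Nat}
    (hij : i ≤ j) (hj : j < qs.length) : qs.getD i 0 ≤ qs.getD j 0 := by
  rcases Nat.lt_or_ge i j with h | h
  · exact le_of_lt (pvGetD_lt qs hs h hj)
  · have : i = j := by omega
    subst this; exact le_refl _

-- strictly increasing integers grow at least by 1 per index
theorem pvSortedGap (qs : List Int) (hs : qs.Pairwise (· < ·)) :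
    ∀ i j : Nat, i ≤ j → j < qs.length → qs.getD i 0 + ((j : Int) - (i : Int)) ≤ qs.getD j 0 := by
  intro i j hij
  induction j, hij using Nat.le_induction with
  | base => intro _; simp
  | succ j hij ih =>
    intro hj
    have hj' : j < qs.length := by omega
    have hlt : qs.getD j 0 < qs.getD (j + 1) 0 := pvGetD_lt qs hs (by omega) hj
    have := ih hj'
    push_cast
    omega

-- the key i ↦ qs[i] - i is nondecreasing on a strictly increasing integer list
theorem pvKeyMono (qs : List Int) (hs : qs.Pairwise (· < ·)) {i j : Nat}
    (hij : i ≤ j) (hj : j < qs.length) :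
    qs.getD i 0 - (i : Int) ≤ qs.getD j 0 - (j : Int) := by
  have := pvSortedGap qs hs i j hij hj
  omega

theorem pvMem_iff (qs : List Int) (y : Int) :
    y ∈ qs ↔ ∃ idx : Nat, idx < qs.length ∧ qs.getD idx 0 = y := by
  rw [List.mem_iff_getElem]
  constructor
  · rintro ⟨n, hn, rfl⟩
    exact ⟨n, hn, List.getD_eq_getElem qs 0 hn⟩
  · rintro ⟨n, hn, h⟩
    exact ⟨n, hn, by rw [← List.getD_eq_getElem qs 0 hn, h]⟩

-- ---------- binary-search specifications ----------
theorem pvBisect_spec (qs : List Int) (x : Int)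
    (hmono : ∀ i j : Nat, i ≤ j → j < qs.length → qs.getD i 0 ≤ qs.getD j 0) :
    ∀ (n lo hi : Nat), hi - lo ≤ n → lo ≤ hi → hi ≤ qs.length →
      (∀ idx, idx < lo → qs.getD idx 0 < x) →
      (∀ idx, hi ≤ idx → idx < qs.length → x ≤ qs.getD idx 0) →
      lo ≤ pvBisect qs x n lo hi ∧ pvBisect qs x n lo hi ≤ hi ∧
      (∀ idx, idx < pvBisect qs x n lo hi → qs.getD idx 0 < x) ∧
      (∀ idx, pvBisect qs x n lo hi ≤ idx → idx < qs.length → x ≤ qs.getD idx 0) := by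
  intro n
  induction n with
  | zero =>
    intro lo hi hn hlohi hhi hpre1 hpre2
    have : lo = hi := by omega
    subst this
    simp only [pvBisect]
    exact ⟨le_refl _, le_refl _, hpre1, hpre2⟩
  | succ n ih =>
    intro lo hi hn hlohi hhi hpre1 hpre2
    by_cases hlh : lo < hi
    · simp only [pvBisect]
      rw [if_pos hlh]
      have hmidlo : lo ≤ (lo + hi) / 2 := by omega
      have hmidhi : (lo + hi) / 2 < hi := by omega
      split_ifs with hcmp
      · have h := ih ((lo + hi) / 2 + 1) hi (by omega) (by omega) hhi
          (fun idx hidx => by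
            rcases Nat.lt_or_ge idx lo with h' | h'
            · exact hpre1 idx h'
            · exact lt_of_le_of_lt (hmono idx ((lo + hi) / 2) (by omega) (by omega)) hcmp)
          hpre2
        exact ⟨le_trans (by omega) h.1, h.2.1, h.2.2.1, h.2.2.2⟩
      · have hxmid : x ≤ qs.getD ((lo + hi) / 2) 0 := le_of_not_gt hcmp
        have h := ih lo ((lo + hi) / 2) (by omega) (by omega) (by omega) hpre1
          (fun idx hidx hlen => le_trans hxmid (hmono ((lo + hi) / 2) idx hidx hlen))
        exact ⟨h.1, le_trans h.2.1 (by omega), h.2.2.1, h.2.2.2⟩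
    · simp only [pvBisect]
      rw [if_neg hlh]
      have : lo = hi := by omega
      subst this
      exact ⟨le_refl _, le_refl _, hpre1, hpre2⟩

theorem pvRunGo_spec (qs : List Int) (c : Int)
    (hmono : ∀ i j : Nat, i ≤ j → j < qs.length → qs.getD i 0 - (i : Int) ≤ qs.getD j 0 - (j : Int)) :
    ∀ (n lo hi : Nat), hi - lo ≤ n → lo ≤ hi → hi ≤ qs.length →
      (∀ idx, idx < lo → qs.getD idx 0 - (idx : Int) < c) →
      (∀ idx, hi ≤ idx → idx < qs.length → c ≤ qs.getD idx 0 - (idx : Int)) →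
      lo ≤ pvRunGo qs c n lo hi ∧ pvRunGo qs c n lo hi ≤ hi ∧
      (∀ idx, idx < pvRunGo qs c n lo hi → qs.getD idx 0 - (idx : Int) < c) ∧
      (∀ idx, pvRunGo qs c n lo hi ≤ idx → idx < qs.length → c ≤ qs.getD idx 0 - (idx : Int)) := by
  intro n
  induction n with
  | zero =>
    intro lo hi hn hlohi hhi hpre1 hpre2
    have : lo = hi := by omega
    subst this
    simp only [pvRunGo]
    exact ⟨le_refl _, le_refl _, hpre1, hpre2⟩
  | succ n ih =>
    intro lo hi hn hlohi hhi hpre1 hpre2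
    by_cases hlh : lo < hi
    · simp only [pvRunGo]
      rw [if_pos hlh]
      have hmidlo : lo ≤ (lo + hi) / 2 := by omega
      have hmidhi : (lo + hi) / 2 < hi := by omega
      split_ifs with hcmp
      · have h := ih ((lo + hi) / 2 + 1) hi (by omega) (by omega) hhi
          (fun idx hidx => by
            rcases Nat.lt_or_ge idx lo with h' | h'
            · exact hpre1 idx h'
            · exact lt_of_le_of_lt (hmono idx ((lo + hi) / 2) (by omega) (by omega)) hcmp)
          hpre2
        exact ⟨le_trans (by omega) h.1, h.2.1, h.2.2.1, h.2.2.2⟩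
      · have hxmid : c ≤ qs.getD ((lo + hi) / 2) 0 - (((lo + hi) / 2 : Nat) : Int) := le_of_not_gt hcmp
        have h := ih lo ((lo + hi) / 2) (by omega) (by omega) (by omega) hpre1
          (fun idx hidx hlen => le_trans hxmid (hmono ((lo + hi) / 2) idx hidx hlen))
        exact ⟨h.1, le_trans h.2.1 (by omega), h.2.2.1, h.2.2.2⟩
    · simp only [pvRunGo]
      rw [if_neg hlh]
      have : lo = hi := by omega
      subst this
      exact ⟨le_refl _, le_refl _, hpre1, hpre2⟩

-- bisect over the whole sorted list: the partition point of x
theorem pvBisect_all (qs : List Int) (hs : qs.Pairwise (· < ·)) (x : Int) :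
    pvBisect qs x qs.length 0 qs.length ≤ qs.length ∧
    (∀ idx, idx < pvBisect qs x qs.length 0 qs.length → qs.getD idx 0 < x) ∧
    (∀ idx, pvBisect qs x qs.length 0 qs.length ≤ idx → idx < qs.length → x ≤ qs.getD idx 0) := by
  have h := pvBisect_spec qs x (fun i j hij hj => pvGetD_le qs hs hij hj) qs.length 0 qs.length
    (by omega) (by omega) (le_refl _) (fun idx hidx => absurd hidx (by omega))
    (fun idx hidx hlen => absurd hlen (by omega))
  exact ⟨h.2.1, h.2.2.1, h.2.2.2⟩

-- if x is in the sorted list, bisect finds its (unique) position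
theorem pvBisect_found (qs : List Int) (hs : qs.Pairwise (· < ·)) (x : Int) (hmem : x ∈ qs) :
    pvBisect qs x qs.length 0 qs.length < qs.length ∧ qs.getD (pvBisect qs x qs.length 0 qs.length) 0 = x := by
  obtain ⟨idx0, hidx0, hval⟩ := (pvMem_iff qs x).1 hmem
  obtain ⟨hle, hlow, hhigh⟩ := pvBisect_all qs hs x
  have hge : pvBisect qs x qs.length 0 qs.length ≤ idx0 := by
    by_contra h
    exact absurd hval (ne_of_lt (hlow idx0 (by omega)))
  refine ⟨by omega, le_antisymm ?_ (hhigh _ (le_refl _) (by omega))⟩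
  calc qs.getD (pvBisect qs x qs.length 0 qs.length) 0 ≤ qs.getD idx0 0 := pvGetD_le qs hs hge hidx0
    _ = x := hval

-- if bisect's branch test succeeds, x is in the list
theorem pvBisect_hit_mem (qs : List Int) (x : Int) {p : Nat}
    (hp : p < qs.length) (hval : qs.getD p 0 = x) : x ∈ qs :=
  (pvMem_iff qs x).2 ⟨p, hp, hval⟩

-- ---------- the B branch computes exactly the chain length in quotient space ----------
-- qs sorted strictly; q a quotient. j := the value Source B computes. Then
-- q - m ∈ qs for 1 ≤ m ≤ j, and q - (j+1) ∉ qs.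
theorem pvB_branch (qs : List Int) (hs : qs.Pairwise (· < ·)) (q : Int)
    (hcond : pvBisect qs (q - 1) qs.length 0 qs.length < qs.length ∧
             qs.getD (pvBisect qs (q - 1) qs.length 0 qs.length) 0 = q - 1) :
    let p := pvBisect qs (q - 1) qs.length 0 qs.length
    let k := pvRunStart qs p
    k ≤ p ∧
    (∀ m : Nat, 1 ≤ m → m ≤ p - k + 1 → (q - (m : Int)) ∈ qs) ∧
    (q - ((p - k + 1 : Nat) : Int) - 1) ∉ qs := by
  intro p k
  obtain ⟨hp, hpv⟩ := hcond
  obtain ⟨hle, hlow, hhigh⟩ := pvBisect_all qs hs (q - 1)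
  have hc : qs.getD p 0 - (p : Int) = q - 1 - (p : Int) := by rw [hpv]
  -- run-start spec on [0, p)
  have hrs := pvRunGo_spec qs (qs.getD p 0 - (p : Int))
    (fun i j hij hj => pvKeyMono qs hs hij hj) p 0 p (by omega) (by omega) (by omega)
    (fun idx hidx => absurd hidx (by omega))
    (fun idx hidx hlen => by
      have := pvSortedGap qs hs p idx hidx hlen
      omega)
  have hk_le : k ≤ p := hrs.2.1
  have hk_low : ∀ idx, idx < k → qs.getD idx 0 - (idx : Int) < qs.getD p 0 - (p : Int) := hrs.2.2.1
  have hk_high : ∀ idx, k ≤ idx → idx < qs.length → qs.getD p 0 - (p : Int) ≤ qs.getD idx 0 - (idx : Int) := hrs.2.2.2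
  -- on [k, p] the key is constant: qs[idx] = (q - 1 - p) + idx
  have hflat : ∀ idx, k ≤ idx → idx ≤ p → qs.getD idx 0 = q - 1 - (p : Int) + (idx : Int) := by
    intro idx h1 h2
    have hup := hk_high idx h1 (by omega)
    have hdn := pvKeyMono qs hs h2 hp
    omega
  refine ⟨hk_le, ?_, ?_⟩
  · intro m h1 h2
    refine (pvMem_iff qs _).2 ⟨p - (m - 1), by omega, ?_⟩
    have := hflat (p - (m - 1)) (by omega) (by omega)
    rw [this]
    have hcast : ((p - (m - 1) : Nat) : Int) = (p : Int) - ((m : Int) - 1) := by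
      push_cast [Nat.cast_sub (by omega : m - 1 ≤ p), Nat.cast_sub h1]
      ring
    rw [hcast]; ring
  · -- q - (p - k + 1) - 1 = qs[k] - 1 is absent
    intro hmem
    obtain ⟨idx1, hidx1, hval1⟩ := (pvMem_iff qs _).1 hmem
    have hqk : qs.getD k 0 = q - 1 - (p : Int) + (k : Int) := hflat k (le_refl _) hk_le
    have hval1' : qs.getD idx1 0 = qs.getD k 0 - 1 := by
      rw [hval1, hqk]
      push_cast [Nat.cast_sub hk_le]
      ring
    have hlt : idx1 < k := by
      by_contra h
      have := pvGetD_le qs hs (le_of_not_gt h) hidx1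
      omega
    have := hk_low idx1 hlt
    have hgap := pvSortedGap qs hs idx1 k (by omega) (by omega)
    omega

-- ---------- arithmetic: shifting by multiples of the step ----------
theorem pvFloordiv_fdiv (a b : Int) : PySem.Int.floordiv a b = Int.fdiv a b := by
  unfold PySem.Int.floordiv; rfl

theorem pvFdiv_sub (x m s : Int) (hs : s ≠ 0) :
    PySem.Int.floordiv (x - m * s) s = PySem.Int.floordiv x s - m := by
  rw [pvFloordiv_fdiv, pvFloordiv_fdiv]
  have h := Int.add_mul_fdiv_right x (-m) hs
  rw [show x + -m * s = x - m * s by ring] at h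
  rw [h]; ring

theorem pvMod_sub (x m s : Int) (hs : s ≠ 0) :
    PySem.Int.mod (x - m * s) s = PySem.Int.mod x s := by
  have h1 := PySem.Int.floordiv_mul_add_mod (x - m * s) s
  have h2 := PySem.Int.floordiv_mul_add_mod x s
  have h3 := pvFdiv_sub x m s hs
  linear_combination h1 - h2 - s * h3

theorem pvDecomp (x : Int) (s : Int) :
    PySem.Int.floordiv x s * s + PySem.Int.mod x s = x :=
  PySem.Int.floordiv_mul_add_mod x s

-- x is determined by its quotient and remainder
theorem pvCard_eq (x card s : Int)
    (hm : PySem.Int.mod x s = PySem.Int.mod card s)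
    (hd : PySem.Int.floordiv x s = PySem.Int.floordiv card s) : x = card := by
  have h1 := pvDecomp x s
  have h2 := pvDecomp card s
  rw [hm, hd] at h1
  omega

-- ---------- the coupling invariant between A's dict and B's residue classes ----------
def pvInv (step : Int) (t : PySem.Dict Int Int) (cl : PySem.Dict Int (List Int)) : Prop :=
  (∀ x : Int, x ∈ t.keys ↔
      PySem.Int.floordiv x step ∈ cl.getD (PySem.Int.mod x step) []) ∧
  (∀ r : Int, (cl.getD r []).Pairwise (· < ·))

-- the setdefault step does not change any getD view
theorem pvSetdefault_getD (cl : PySem.Dict Int (List Int)) (r r' : Int) :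
    (if cl.contains r then cl else cl.insert r []).getD r' [] = cl.getD r' [] := by
  split_ifs with h
  · rfl
  · rw [PySem.Dict.getD_insert]
    split_ifs with h2
    · subst h2
      exact (PySem.Dict.getD_of_not_contains cl [] (by simpa using h)).symm
    · rfl

-- inserting q at its bisect position keeps the list strictly sorted and adds q
theorem pvInsert_sorted (qs : List Int) (hs : qs.Pairwise (· < ·)) (q : Int)
    (hnot : q ∉ qs) :
    let i := pvBisect qs q qs.length 0 qs.length
    (PySem.List.insert qs (i : Int) q).Pairwise (· < ·) ∧
    (∀ y : Int, y ∈ PySem.List.insert qs (i : Int) q ↔ y = q ∨ y ∈ qs) := by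
  intro i
  obtain ⟨hle, hlow, hhigh⟩ := pvBisect_all qs hs q
  rw [PySem.List.insert_natCast qs i q hle]
  have hF1 : ∀ a ∈ qs.take i, a < q := by
    intro a ha
    obtain ⟨idx, hidx, rfl⟩ := List.mem_iff_getElem.1 ha
    rw [List.getElem_take]
    have hlt : (List.take i qs).length = min i qs.length := List.length_take
    have hidx' : idx < i := by omega
    have hlen : idx < qs.length := by omega
    have := hlow idx hidx'
    rwa [List.getD_eq_getElem qs 0 hlen] at this
  have hF2 : ∀ b ∈ qs.drop i, q < b := by
    intro b hb
    obtain ⟨jdx, hjdx, rfl⟩ := List.mem_iff_getElem.1 hb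
    rw [List.getElem_drop]
    have hld : (List.drop i qs).length = qs.length - i := List.length_drop
    have hlen : i + jdx < qs.length := by omega
    have hq := hhigh (i + jdx) (by omega) hlen
    rw [List.getD_eq_getElem qs 0 hlen] at hq
    rcases lt_or_eq_of_le hq with h | h
    · exact h
    · exact absurd ((pvMem_iff qs q).2 ⟨i + jdx, hlen, by rw [List.getD_eq_getElem qs 0 hlen, ← h]⟩) hnot
  constructor
  · rw [List.pairwise_append]
    refine ⟨List.Pairwise.sublist (List.take_sublist i qs) hs, ?_, ?_⟩
    · rw [List.pairwise_cons]
      exact ⟨hF2, List.Pairwise.sublist (List.drop_sublist i qs) hs⟩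
    · intro a ha b hb
      rcases List.mem_cons.1 hb with rfl | hb'
      · exact hF1 a ha
      · exact lt_trans (hF1 a ha) (hF2 b hb')
  · intro y
    constructor
    · intro hy
      rcases List.mem_append.1 hy with h | h
      · exact Or.inr (List.mem_of_mem_take h)
      · rcases List.mem_cons.1 h with rfl | h'
        · exact Or.inl rfl
        · exact Or.inr (List.mem_of_mem_drop h')
    · rintro (rfl | hy)
      · exact List.mem_append.2 (Or.inr (List.mem_cons_self))
      · rcases List.mem_append.1 ((List.take_append_drop i qs).symm ▸ hy) with h | h
        · exact List.mem_append.2 (Or.inl h)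
        · exact List.mem_append.2 (Or.inr (List.mem_cons_of_mem _ h))

-- ---------- Source B's insert guard holds exactly when q is new ----------
theorem pvCond_iff (qs : List Int) (hs : qs.Pairwise (· < ·)) (q : Int) :
    (pvBisect qs q qs.length 0 qs.length = qs.length ∨ qs.getD (pvBisect qs q qs.length 0 qs.length) 0 ≠ q)
      ↔ q ∉ qs := by
  constructor
  · rintro (h | h) hmem
    · obtain ⟨hlt, -⟩ := pvBisect_found qs hs q hmem
      omega
    · obtain ⟨-, hv⟩ := pvBisect_found qs hs q hmem
      exact h hv
  · intro hnot
    by_contra h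
    push Not at h
    obtain ⟨h1, h2⟩ := h
    have hle := (pvBisect_all qs hs q).1
    exact hnot (pvBisect_hit_mem qs q (by omega) h2)

-- ---------- invariant preservation by one iteration ----------
theorem pvStepAB_inv (step : Int) (_hs0 : step ≠ 0) (t : PySem.Dict Int Int)
    (cl : PySem.Dict Int (List Int)) (msg : List Int) (card : Int)
    (hInv : pvInv step t cl) :
    pvInv step (pvFA step (msg, t) card).2 (pvFB step (msg, cl) card).2 := by
  obtain ⟨hmem, hsort⟩ := hInv
  simp only [pvFA, pvFB]
  set q := PySem.Int.floordiv card step with hq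
  set r := PySem.Int.mod card step with hr
  set d1 := if cl.contains r then cl else cl.insert r [] with hd1
  have hd1getD : ∀ r' : Int, d1.getD r' [] = cl.getD r' [] := fun r' => pvSetdefault_getD cl r r'
  set qs := d1.getD r [] with hqs
  have hqscl : qs = cl.getD r [] := hd1getD r
  have hqssort : qs.Pairwise (· < ·) := hqscl ▸ hsort r
  set i := pvBisect qs q qs.length 0 qs.length with hi
  set addr := pvAWhile t step (t.size + 1) card with haddr
  have hkeys : ∀ x : Int, x ∈ (t.insert card addr).keys ↔ x = card ∨ x ∈ t.keys :=
    fun x => PySem.Dict.mem_keys_insert t card x addr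
  by_cases hcond : i = qs.length ∨ qs.getD i 0 ≠ q
  · -- q is new: it is inserted into the residue class of card
    have hqnot : q ∉ qs := (pvCond_iff qs hqssort q).1 hcond
    obtain ⟨hsorted', hmem'⟩ := pvInsert_sorted qs hqssort q hqnot
    rw [if_pos hcond]
    constructor
    · intro x
      rw [hkeys x, PySem.Dict.getD_insert]
      by_cases hxr : PySem.Int.mod x step = r
      · rw [if_pos hxr, hmem' (PySem.Int.floordiv x step)]
        rw [hmem x, hxr, ← hqscl]
        constructor
        · rintro (rfl | hx)
          · exact Or.inl hq.symm
          · exact Or.inr hx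
        · rintro (hx | hx)
          · exact Or.inl (pvCard_eq x card step (by rw [hxr, hr]) (by rw [hx, hq]))
          · exact Or.inr hx
      · rw [if_neg hxr, hd1getD, ← hmem x]
        constructor
        · rintro (rfl | hx)
          · exact absurd hr.symm hxr
          · exact hx
        · exact Or.inr
    · intro r'
      rw [PySem.Dict.getD_insert]
      split_ifs with h
      · exact hsorted'
      · rw [hd1getD]; exact hsort r'
  · -- q was already present: the card was already a key, nothing changes as a set
    have hqin : q ∈ qs := by
      by_contra hqnot
      exact hcond ((pvCond_iff qs hqssort q).2 hqnot)
    have hcardkey : card ∈ t.keys := (hmem card).2 (by rw [← hq, ← hr, ← hqscl]; exact hqin)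
    rw [if_neg hcond]
    constructor
    · intro x
      rw [hkeys x, hd1getD, ← hmem x]
      constructor
      · rintro (rfl | hx)
        · exact hcardkey
        · exact hx
      · exact Or.inr
    · intro r'
      rw [hd1getD]; exact hsort r'

-- ---------- one loop iteration: equal appended outputs ----------
theorem pvStepAB (step : Int) (hs0 : step ≠ 0) (t : PySem.Dict Int Int)
    (cl : PySem.Dict Int (List Int)) (msg : List Int) (card : Int)
    (hInv : pvInv step t cl) :
    (pvFA step (msg, t) card).1 = (pvFB step (msg, cl) card).1 := by
  obtain ⟨hmem, hsort⟩ := hInv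
  simp only [pvFA, pvFB]
  set q := PySem.Int.floordiv card step with hq
  set r := PySem.Int.mod card step with hr
  set d1 := if cl.contains r then cl else cl.insert r [] with hd1
  have hd1getD : ∀ r' : Int, d1.getD r' [] = cl.getD r' [] := fun r' => pvSetdefault_getD cl r r'
  set qs := d1.getD r [] with hqs
  have hqscl : qs = cl.getD r [] := hd1getD r
  have hqssort : qs.Pairwise (· < ·) := hqscl ▸ hsort r
  set p := pvBisect qs (q - 1) qs.length 0 qs.length with hp
  -- membership translation: card - m*step ∈ keys ↔ q - m ∈ qs
  have htrans : ∀ m : Int, (card - m * step) ∈ t.keys ↔ (q - m) ∈ qs := by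
    intro m
    rw [hmem (card - m * step), pvMod_sub card m step hs0, pvFdiv_sub card m step hs0,
      ← hr, ← hq, ← hqscl]
  have hJle := pvBotIdx_le t.keys step card hs0
  have hAval : pvAWhile t step (t.size + 1) card
      = card - (pvBotIdx t.keys step card hs0 : Int) * step := by
    have := pvKeysLen t
    exact pvAWhile_eq t step hs0 (t.size + 1) card (by omega)
  by_cases hcond : p < qs.length ∧ qs.getD p 0 = q - 1
  · obtain ⟨hkle, hchain, hexit⟩ := pvB_branch qs hqssort q hcond
    set k := pvRunStart qs p with hk
    set j : Nat := p - k + 1 with hj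
    have hchainA : pvInChain t.keys step card j := by
      intro m h1 h2
      exact (htrans (m : Int)).2 (hchain m h1 h2)
    have hexitA : (card - ((j : Int) + 1) * step) ∉ t.keys := by
      intro hmem'
      have := (htrans ((j : Int) + 1)).1 hmem'
      exact hexit (by rwa [show q - ((j : Nat) : Int) - 1 = q - (((j : Nat) : Int) + 1) by ring])
    have hJ : j = pvBotIdx t.keys step card hs0 :=
      pvBotIdx_unique t.keys step card hs0 j hchainA hexitA
    have hkle' : k ≤ p := hkle
    have hcast2 : ((p - k + 1 : Nat) : Int) = (p : Int) - (k : Int) + 1 := by omega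
    rw [if_pos hcond, hAval, ← hJ, hj, hcast2]
  · have hnot : (q - 1) ∉ qs := by
      intro hmemq
      exact hcond (pvBisect_found qs hqssort (q - 1) hmemq)
    have hJ0 : pvBotIdx t.keys step card hs0 = 0 := by
      apply pvBotIdx_zero
      intro hmem'
      exact hnot ((htrans 1).1 (by rwa [one_mul]))
    rw [if_neg hcond, hAval, hJ0]
    norm_num

-- ---------- the whole fold ----------
theorem pvFoldEq (step : Int) (hs0 : step ≠ 0) :
    ∀ (l msg : List Int) (t : PySem.Dict Int Int) (cl : PySem.Dict Int (List Int)),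
      pvInv step t cl →
      (l.foldl (pvFA step) (msg, t)).1 = (l.foldl (pvFB step) (msg, cl)).1 := by
  intro l
  induction l with
  | nil => intro msg t cl _; rfl
  | cons c l ih =>
    intro msg t cl hInv
    have h1 := pvStepAB step hs0 t cl msg c hInv
    have h2 := pvStepAB_inv step hs0 t cl msg c hInv
    simp only [List.foldl_cons]
    have hB : pvFB step (msg, cl) c = ((pvFA step (msg, t) c).1, (pvFB step (msg, cl) c).2) :=
      Prod.ext h1.symm rfl
    rw [hB]
    exact ih (pvFA step (msg, t) c).1 (pvFA step (msg, t) c).2 (pvFB step (msg, cl) c).2 h2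

-- with effective step 0 and pairwise-distinct cards A's loop copies the input
theorem pvFold0A :
    ∀ (l msg : List Int) (t : PySem.Dict Int Int),
      (∀ x ∈ l, x ∉ t.keys) → l.Nodup →
      (l.foldl (pvFA 0) (msg, t)).1 = msg ++ l := by
  intro l
  induction l with
  | nil => intro msg t _ _; simp
  | cons c l ih =>
    intro msg t hnm hnd
    have hcm : c ∉ t.keys := hnm c List.mem_cons_self
    have hct : t.contains (c - 0) = false := by
      rw [sub_zero]
      exact pvNotMem_contains t c hcm
    have hA : pvFA 0 (msg, t) c = (msg ++ [c], t.insert c c) := by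
      simp only [pvFA, pvAWhile, hct, Bool.false_eq_true, if_false]
    rw [List.foldl_cons, hA]
    rw [ih (msg ++ [c]) (t.insert c c) ?hmem (List.nodup_cons.1 hnd).2]
    · simp
    case hmem =>
      intro x hx
      rw [PySem.Dict.mem_keys_insert]
      rintro (rfl | hxk)
      · exact (List.nodup_cons.1 hnd).1 hx
      · exact hnm x (List.mem_cons_of_mem _ hx) hxk

-- the invariant holds for the two empty dicts
theorem pvInv_empty (step : Int) : pvInv step PySem.Dict.empty PySem.Dict.empty := by
  constructor
  · intro x
    rw [PySem.Dict.keys_empty, PySem.Dict.getD_empty]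
    simp
  · intro r
    rw [PySem.Dict.getD_empty]
    exact List.Pairwise.nil

-- ===== VERDICT (by name: the statement is the Claim_ definition above) =====
theorem unhash_msg_py_spec : Claim_equal_unhash_msg_py := by
  intro l s _hdom hpre
  show unhash_msg_py l s = unhash_msg_py_alt l s
  simp only [unhash_msg_py, unhash_msg_py_alt]
  have hstep : (if s ≠ 3 then s else 5) = (if s = 3 then 5 else s) := by
    by_cases h : s = 3 <;> simp [h]
  rw [hstep]
  by_cases hz : (if s = 3 then 5 else s) = 0
  · have hs0 : s = 0 := by
      by_cases h : s = 3
      · simp [h] at hz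
      · simp [h] at hz; omega
    rw [if_pos hz, hz]
    exact pvFold0A l [] PySem.Dict.empty
      (fun x _ hx => by rw [PySem.Dict.keys_empty] at hx; simp at hx) (hpre hs0)
  · rw [if_neg hz]
    exact pvFoldEq (if s = 3 then 5 else s) hz l [] PySem.Dict.empty PySem.Dict.empty
      (pvInv_empty _)
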